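-- pv_equiv track=rewrite | github.com/PHILAE-PROJECT/QueryBasedClustering | SequencesClustersEvaluation.py | homogeneity_evaluation
-- ===== SOURCE A (Python) =====
-- def homogeneity_evaluation(sequence1: list, sequence2: list) -> tuple:
--     if isinstance(sequence1, list) is False or isinstance(sequence2, list) is False:
--         raise TypeError("The inputs should be of type list.")
--     # end if
--     # Make a copy to avoid modifying the original sequences
--     copy1 = sequence1.copy()
--     copy2 = sequence2.copy()
--     if copy1 == copy2:
--         return 0, list()
--     # end if
--     # Holds the missing items
--     missing = list()
--     while copy1 and copy2:
--         if copy1 == copy2: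
--             copy1, copy2 = list(), list()
--             break
--         # end if
--         current = copy1[0]
--         is_missing = True
--         while current in copy2:
--             is_missing = False
--             copy2.remove(current)
--         # end while
--         while current in copy1:
--             copy1.remove(current)
--         # end while
--         if is_missing is True and current not in missing:
--             missing.append(current)
--         # end if
--     # end while
--     for item in copy1 + copy2:
--         if item not in missing:
--             missing.append(item)
--         # end if
--     # end for
--     return len(missing), missing
-- ===== SOURCE B (Python) =====
-- def homogeneity_evaluation(sequence1: list, sequence2: list) -> tuple:
--     if isinstance(sequence1, list) is False or isinstance(sequence2, list) is False:
--         raise TypeError("The inputs should be of type list.")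
--     missing = list()
--     for x in sequence1:
--         if x not in sequence2 and x not in missing:
--             missing.append(x)
--     for y in sequence2:
--         if y not in sequence1 and y not in missing:
--             missing.append(y)
--     return len(missing), missing
-- ===== Notes on version B (the rewrite author's own statement) =====
-- stated objective: simpler
-- what changed: Replaces A's destructive consume-loop (copying both lists, repeatedly removing all occurrences of the current head from both copies, plus a leftover pass) with two plain non-mutating forward passes that append each distinct element of one list not contained in the other.
import Mathlib
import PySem

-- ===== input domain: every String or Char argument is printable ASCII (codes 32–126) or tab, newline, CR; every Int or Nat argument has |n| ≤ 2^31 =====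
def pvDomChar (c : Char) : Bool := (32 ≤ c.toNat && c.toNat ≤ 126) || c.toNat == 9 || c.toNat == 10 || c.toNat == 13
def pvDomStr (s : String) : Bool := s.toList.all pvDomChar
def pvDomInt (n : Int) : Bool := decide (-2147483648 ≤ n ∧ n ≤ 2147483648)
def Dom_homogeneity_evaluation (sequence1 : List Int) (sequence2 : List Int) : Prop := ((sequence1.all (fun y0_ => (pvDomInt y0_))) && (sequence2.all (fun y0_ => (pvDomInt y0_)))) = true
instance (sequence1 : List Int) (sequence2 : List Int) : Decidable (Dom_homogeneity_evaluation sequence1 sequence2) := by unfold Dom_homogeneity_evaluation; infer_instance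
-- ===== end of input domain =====

-- B replaces A's destructive consume-loop over mutated copies with two plain
-- non-mutating membership passes (simpler); return values proved equal on all inputs.

-- ===== PORT A =====

-- 'while current in l: l.remove(current)' removes the first occurrence until none
-- is left, i.e. it drops every occurrence front to back; this recursion is exact.
def pvRemoveAll (c : Int) : List Int → List Int
  | [] => []
  | x :: xs => if x = c then pvRemoveAll c xs else x :: pvRemoveAll c xs

theorem pvRemoveAll_length_le (c : Int) (l : List Int) :
    (pvRemoveAll c l).length ≤ l.length := by
  induction l with
  | nil => simp [pvRemoveAll]
  | cons x xs ih =>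
    simp only [pvRemoveAll]
    split <;> simp <;> omega

-- the outer 'while copy1 and copy2' loop of A (guard = both lists nonempty)
def homogLoop : List Int → List Int → List Int → List Int × List Int × List Int
  | [], copy2, missing => ([], copy2, missing)
  | copy1@(_ :: _), [], missing => (copy1, [], missing)
  | copy1@(current :: _tail), copy2@(_ :: _), missing =>
    if copy1 = copy2 then ([], [], missing)
    else
      let is_missing : Bool := decide (current ∉ copy2)
      let copy2' := pvRemoveAll current copy2
      let copy1' := pvRemoveAll current copy1
      let missing' := if is_missing = true ∧ current ∉ missing then missing ++ [current] else missing
      homogLoop copy1' copy2' missing'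
termination_by c1 _ _ => c1.length
decreasing_by
  subst copy1
  show (pvRemoveAll current (current :: _tail)).length < (current :: _tail).length
  simp only [pvRemoveAll]
  exact Nat.lt_succ_of_le (pvRemoveAll_length_le current _tail)

def homogeneity_evaluation (sequence1 : List Int) (sequence2 : List Int) : Int × List Int :=
  if sequence1 = sequence2 then (0, [])
  else
    let r := homogLoop sequence1 sequence2 []
    let missing := (r.1 ++ r.2.1).foldl (fun m item => if item ∉ m then m ++ [item] else m) r.2.2
    ((missing.length : Int), missing)

-- ===== PORT B =====
def homogeneity_evaluation_alt (sequence1 : List Int) (sequence2 : List Int) : Int × List Int :=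
  let m1 := sequence1.foldl (fun m x => if x ∉ sequence2 ∧ x ∉ m then m ++ [x] else m) []
  let m := sequence2.foldl (fun m y => if y ∉ sequence1 ∧ y ∉ m then m ++ [y] else m) m1
  ((m.length : Int), m)

-- ===== PRECONDITION & SPEC =====
def Spec_homogeneity_evaluation (sequence1 : List Int) (sequence2 : List Int) (out : Int × List Int) : Prop := out = homogeneity_evaluation_alt sequence1 sequence2
instance (sequence1 : List Int) (sequence2 : List Int) (out : Int × List Int) : Decidable (Spec_homogeneity_evaluation sequence1 sequence2 out) := by unfold Spec_homogeneity_evaluation; infer_instance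

-- ===== CLAIM (what is proved, stated in full; the proofs are below) =====
def Claim_equal_homogeneity_evaluation : Prop := ∀ (sequence1 : List Int) (sequence2 : List Int), Dom_homogeneity_evaluation sequence1 sequence2 → Spec_homogeneity_evaluation sequence1 sequence2 (homogeneity_evaluation sequence1 sequence2)

-- ===== LEMMAS AND PROOFS =====

-- dedup-append fold shared by both analyses
def pvDA (acc l : List Int) : List Int :=
  l.foldl (fun m item => if item ∉ m then m ++ [item] else m) acc

-- keep the elements NOT occurring in s
def pvFiltNot (s : List Int) : List Int → List Int
  | [] => []
  | x :: xs => if x ∈ s then pvFiltNot s xs else x :: pvFiltNot s xs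

theorem pvFiltNot_nil (l : List Int) : pvFiltNot [] l = l := by
  induction l with
  | nil => rfl
  | cons x xs ih => simp [pvFiltNot, ih]

theorem pvFiltNot_self (l : List Int) (s : List Int) (h : ∀ x ∈ l, x ∈ s) :
    pvFiltNot s l = [] := by
  induction l with
  | nil => rfl
  | cons x xs ih =>
    simp only [pvFiltNot, if_pos (h x (by simp))]
    exact ih (fun y hy => h y (by simp [hy]))

theorem pvDA_cons (acc : List Int) (x : Int) (l : List Int) :
    pvDA acc (x :: l) = pvDA (if x ∉ acc then acc ++ [x] else acc) l := rfl

theorem mem_pvDA_step (v x : Int) (acc : List Int) (h : v ∈ acc) :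
    v ∈ (if x ∉ acc then acc ++ [x] else acc) := by
  split <;> simp [h]

theorem mem_pvRemoveAll (c x : Int) (l : List Int) (hx : x ≠ c) :
    (x ∈ pvRemoveAll c l) ↔ x ∈ l := by
  induction l with
  | nil => simp [pvRemoveAll]
  | cons y ys ih =>
    simp only [pvRemoveAll]
    split
    · next hy => subst hy; simp [ih, hx]
    · simp [ih]

theorem pvRemoveAll_of_not_mem (c : Int) (l : List Int) (h : c ∉ l) :
    pvRemoveAll c l = l := by
  induction l with
  | nil => rfl
  | cons y ys ih =>
    simp only [List.mem_cons, not_or] at h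
    simp [pvRemoveAll, Ne.symm h.1, ih h.2]

-- elements already in acc are no-ops for the dedup fold, so removing them changes nothing
theorem pvDA_removeAll (c : Int) (acc l : List Int) (h : c ∈ acc) :
    pvDA acc (pvRemoveAll c l) = pvDA acc l := by
  induction l generalizing acc with
  | nil => rfl
  | cons x xs ih =>
    simp only [pvRemoveAll]
    split
    · next hx => subst hx; rw [pvDA_cons, if_neg (by simp [h])]; exact ih acc h
    · rw [pvDA_cons, pvDA_cons]
      exact ih _ (mem_pvDA_step c x acc h)

theorem pvFiltNot_removeAll (cur : Int) (a l : List Int) (ha : cur ∈ a) :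
    pvFiltNot (pvRemoveAll cur a) (pvRemoveAll cur l) = pvFiltNot a l := by
  induction l with
  | nil => rfl
  | cons x xs ih =>
    simp only [pvRemoveAll]
    by_cases hx : x = cur
    · subst hx
      rw [show pvFiltNot a (x :: xs) = pvFiltNot a xs from by
            simp [pvFiltNot, ha], if_pos rfl]
      exact ih
    · rw [if_neg hx]
      simp only [pvFiltNot, mem_pvRemoveAll cur x a hx]
      split <;> simp [ih]

theorem pvFiltNot_removeAll_comm (s : List Int) (cur : Int) (l : List Int) :
    pvFiltNot s (pvRemoveAll cur l) = pvRemoveAll cur (pvFiltNot s l) := by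
  induction l with
  | nil => rfl
  | cons x xs ih =>
    simp only [pvRemoveAll, pvFiltNot]
    by_cases hx : x = cur
    · subst hx
      rw [if_pos rfl]
      split
      · exact ih
      · simp [pvRemoveAll, ih]
    · rw [if_neg hx]
      simp only [pvFiltNot]
      split
      · exact ih
      · simp [pvRemoveAll, hx, ih]

-- main loop invariant: finishing A's loop and its leftover pass equals
-- dedup-appending (c1 minus c2's values) then (c2 minus c1's values) onto the accumulator
theorem homogLoop_main (c1 c2 missing : List Int) :
    pvDA (homogLoop c1 c2 missing).2.2
      ((homogLoop c1 c2 missing).1 ++ (homogLoop c1 c2 missing).2.1)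
      = pvDA (pvDA missing (pvFiltNot c2 c1)) (pvFiltNot c1 c2) := by
  induction c1, c2, missing using homogLoop.induct with
  | case1 c2 missing =>
    simp [homogLoop, pvFiltNot, pvFiltNot_nil, pvDA]
  | case2 copy1 h missing =>
    simp [homogLoop, pvFiltNot, pvFiltNot_nil, pvDA]
  | case3 current _tail b bs missing heq =>
    rw [homogLoop, if_pos heq]
    rw [heq]
    rw [pvFiltNot_self (b :: bs) (b :: bs) (fun x hx => hx)]
    rfl
  | case4 current _tail b bs missing hne is_missing_ c2_ c1_ m_ ih =>
    have hstep : homogLoop (current :: _tail) (b :: bs) missing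
        = homogLoop (pvRemoveAll current (current :: _tail)) (pvRemoveAll current (b :: bs))
            (if (decide (current ∉ (b :: bs))) = true ∧ current ∉ missing
              then missing ++ [current] else missing) := by
      conv_lhs => rw [homogLoop]
      rw [if_neg hne]
    rw [hstep]
    refine ih.trans ?_
    simp only [m_, c1_, c2_, is_missing_]
    simp only [dite_eq_ite]
    have hcur1 : current ∈ current :: _tail := List.mem_cons_self
    by_cases hc2 : current ∈ b :: bs
    · have hmiss : (if (decide (current ∉ (b :: bs))) = true ∧ current ∉ missing
          then missing ++ [current] else missing) = missing := by
        rw [if_neg]; simp [hc2]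
      rw [hmiss, pvFiltNot_removeAll current (b :: bs) (current :: _tail) hc2,
          pvFiltNot_removeAll current (current :: _tail) (b :: bs) hcur1]
    · have hmiss : (if (decide (current ∉ (b :: bs))) = true ∧ current ∉ missing
          then missing ++ [current] else missing)
          = (if current ∉ missing then missing ++ [current] else missing) := by
        simp [hc2]
      have hcurmem : current ∈ (if current ∉ missing then missing ++ [current] else missing) := by
        split <;> simp_all
      have h2' : pvRemoveAll current (b :: bs) = b :: bs :=
        pvRemoveAll_of_not_mem current (b :: bs) hc2
      have hfilt1 : pvFiltNot (b :: bs) (current :: _tail)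
          = current :: pvFiltNot (b :: bs) _tail := by
        simp [pvFiltNot, hc2]
      rw [hmiss, pvFiltNot_removeAll current (current :: _tail) (b :: bs) hcur1, h2',
          hfilt1, pvDA_cons]
      congr 1
      have hra : pvRemoveAll current (current :: _tail) = pvRemoveAll current _tail := by
        simp [pvRemoveAll]
      rw [hra, pvFiltNot_removeAll_comm]
      exact pvDA_removeAll current _ _ hcurmem

-- B's fold with the '∉ other' test inside equals the dedup fold over the filtered list
theorem pvFold_B (s l acc : List Int) :
    l.foldl (fun m x => if x ∉ s ∧ x ∉ m then m ++ [x] else m) acc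
      = pvDA acc (pvFiltNot s l) := by
  induction l generalizing acc with
  | nil => rfl
  | cons x xs ih =>
    rw [List.foldl_cons]
    by_cases hx : x ∈ s
    · rw [if_neg (by simp [hx]), show pvFiltNot s (x :: xs) = pvFiltNot s xs from by
        simp [pvFiltNot, hx]]
      exact ih acc
    · rw [show pvFiltNot s (x :: xs) = x :: pvFiltNot s xs from by simp [pvFiltNot, hx],
          pvDA_cons,
          show (if x ∉ s ∧ x ∉ acc then acc ++ [x] else acc)
            = (if x ∉ acc then acc ++ [x] else acc) from by simp [hx]]
      exact ih _

theorem homog_eq (s1 s2 : List Int) :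
    homogeneity_evaluation s1 s2 = homogeneity_evaluation_alt s1 s2 := by
  by_cases h : s1 = s2
  · subst h
    simp [homogeneity_evaluation, homogeneity_evaluation_alt, pvFold_B,
      pvFiltNot_self s1 s1 (fun x hx => hx), pvDA]
  · have key := homogLoop_main s1 s2 []
    simp only [pvDA] at key
    simp only [homogeneity_evaluation, homogeneity_evaluation_alt, if_neg h,
      pvFold_B, pvDA, key]

-- ===== VERDICT (by name: the statement is the Claim_ definition above) =====
theorem homogeneity_evaluation_spec : Claim_equal_homogeneity_evaluation := by
  intro s1 s2 _
  unfold Spec_homogeneity_evaluation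
  exact homog_eq s1 s2
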